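-- pv_equiv track=rewrite | github.com/jthillar/computer-v2 | parsing.py | sortParentheses
-- ===== SOURCE A (Python) =====
-- def sortParentheses(coupleVec):
-- 	"""Get Largest or single penrathese"""
--
-- 	coupleToDrop = list()
-- 	for i, couple in enumerate(coupleVec):
-- 		for couple2 in coupleVec:
-- 			if couple[0][0] > couple2[0][0] and couple[1] < couple2[1]:
-- 				coupleToDrop.append(i)
-- 	for i in coupleToDrop:
-- 		del coupleVec[i]
--
-- 	return coupleVec
-- ===== SOURCE B (Python) =====
-- def sortParentheses(coupleVec):
--     """Keep only the couples not strictly contained in another couple (one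
--     with a smaller first bound and a larger second bound).  Sort by first
--     bound and sweep once with a running maximum of the second bounds, so each
--     couple is tested against the best earlier bound in O(1)."""
--     n = len(coupleVec)
--     order = sorted(range(n), key=lambda i: coupleVec[i][0][0])
--     dominated = [False] * n
--     best = None      # max second bound among couples with a strictly smaller first bound
--     run_max = None   # max second bound among all couples seen so far
--     prev = None      # first bound of the previously visited couple
--     for i in order:
--         start = coupleVec[i][0][0]
--         end = coupleVec[i][1]
--         if prev is not None and start != prev:
--             best = run_max
--         if best is not None and end < best:
--             dominated[i] = True
--         if run_max is None or end > run_max: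
--             run_max = end
--         prev = start
--     return [c for i, c in enumerate(coupleVec) if not dominated[i]]
-- ===== Notes on version B (the rewrite author's own statement) =====
-- stated objective: alternative
-- what changed: A collects an index per dominating pair with a nested quadratic scan and then performs a sequence of in-place deletions with the stale collected indices; B sorts the indices by first bound once and marks dominated couples in a single sweep that keeps a running maximum of the second bounds, then filters the list without mutating it (A mutates its argument; the return value is what is proved equal).
-- intended difference: On inputs where the total number of dominating pairs is at least two, A's collected drop indices go stale as earlier deletions shift the list, so A deletes neighbouring couples that are not dominated (e.g. on [([2],3),([0],9),([1],9)] it returns [([1],9)]), while B removes exactly the dominated couples (returning [([0],9),([1],9)]), which is the intended behaviour. — e.g. on sortParentheses([([2], 3), ([0], 9), ([1], 9)]): A returns [([1], 9)], B returns [([0], 9), ([1], 9)]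
import Mathlib
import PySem

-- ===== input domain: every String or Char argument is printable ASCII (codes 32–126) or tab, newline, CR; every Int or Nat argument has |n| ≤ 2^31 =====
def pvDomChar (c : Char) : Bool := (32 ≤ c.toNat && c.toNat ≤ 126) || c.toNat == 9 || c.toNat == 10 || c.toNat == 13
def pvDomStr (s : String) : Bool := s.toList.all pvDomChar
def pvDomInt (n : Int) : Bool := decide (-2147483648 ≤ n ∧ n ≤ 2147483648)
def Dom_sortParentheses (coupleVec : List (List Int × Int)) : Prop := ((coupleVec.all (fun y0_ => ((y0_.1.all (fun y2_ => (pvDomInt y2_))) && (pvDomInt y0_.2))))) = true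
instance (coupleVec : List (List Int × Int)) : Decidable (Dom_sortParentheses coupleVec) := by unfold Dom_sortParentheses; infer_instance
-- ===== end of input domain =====

-- B replaces A's quadratic dominator scan + in-place stale-index deletions by sort-by-first-bound
-- and a single running-maximum sweep; A mutates its argument in place, the equivalence proved
-- here is about the return value only.

-- ===== PORT A =====
-- couple[0][0] is ported as pyGetD … 0 (exact under Pre_, which demands nonempty first
-- components); `del coupleVec[i]` is pop?; pop? = none is Python's IndexError, excluded by Pre_.
def sortParentheses (coupleVec : List (List Int × Int)) : List (List Int × Int) :=
  let coupleToDrop : List Int := (PySem.List.enumerate coupleVec).foldl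
    (fun acc ic => coupleVec.foldl
      (fun acc2 c2 =>
        if PySem.List.pyGetD ic.2.1 0 0 > PySem.List.pyGetD c2.1 0 0 && ic.2.2 < c2.2
        then acc2 ++ [ic.1] else acc2) acc) []
  coupleToDrop.foldl
    (fun cur i => match PySem.List.pop? cur i with
      | some r => r.2
      | none => cur) coupleVec

-- ===== PORT B =====
-- coupleVec[i][0][0] and coupleVec[i][1] of Source B (exact under Pre_, which demands nonempty
-- first components)
def pvKeyAt (cv : List (List Int × Int)) (i : Int) : Int :=
  PySem.List.pyGetD (PySem.List.pyGetD cv i ([], 0)).1 0 0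
def pvEndAt (cv : List (List Int × Int)) (i : Int) : Int :=
  (PySem.List.pyGetD cv i ([], 0)).2

-- the `best` update of one sweep iteration of Source B (state = (dominated, best, run_max, prev))
def bBest (cv : List (List Int × Int))
    (st : List Bool × Option Int × Option Int × Option Int) (i : Int) : Option Int :=
  match st.2.2.2 with
  | some p => if pvKeyAt cv i ≠ p then st.2.2.1 else st.2.1
  | none => st.2.1

-- one iteration of Source B's sweep; i ranges over sorted(range(n)), hence is a valid non-negative
-- index, so `dominated[i] = True` is pySetD (exact in range)
def bStep (cv : List (List Int × Int))
    (st : List Bool × Option Int × Option Int × Option Int) (i : Int) :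
    List Bool × Option Int × Option Int × Option Int :=
  (match bBest cv st i with
    | some b => if pvEndAt cv i < b then PySem.List.pySetD st.1 i true else st.1
    | none => st.1,
   bBest cv st i,
   match st.2.2.1 with
    | none => some (pvEndAt cv i)
    | some r => if pvEndAt cv i > r then some (pvEndAt cv i) else some r,
   some (pvKeyAt cv i))

def sortParentheses_alt (coupleVec : List (List Int × Int)) : List (List Int × Int) :=
  let n := coupleVec.length
  let order := PySem.List.sorted (PySem.List.pyRange 0 (n : Int) 1) (fun i => pvKeyAt coupleVec i)
  let st := order.foldl (bStep coupleVec) (List.replicate n false, none, none, none)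
  (PySem.List.enumerate coupleVec).foldl
    (fun acc pc => if !(PySem.List.pyGetD st.1 pc.1 false) then acc ++ [pc.2] else acc) []

-- ===== PRECONDITION & SPEC =====
-- pvCountDominators cv c: how many couples of cv dominate couple c, i.e. have a smaller first bound
-- and a larger second bound (a closed-form condition on the input, phrased with headI)
def pvCountDominators (cv : List (List Int × Int)) (c : List Int × Int) : Nat :=
  (cv.filter (fun c2 => decide (c2.1.headI < c.1.headI ∧ c.2 < c2.2))).length
-- pvCounts cv: that count for each couple (= its multiplicity in A's drop list)
def pvCounts (cv : List (List Int × Int)) : List Nat := cv.map (fun c => pvCountDominators cv c)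

-- Pre_ excludes exactly the inputs where A raises IndexError: a couple with an empty first
-- component (couple[0][0] fails), or a drop sequence whose k-th stored index runs past the list
-- as it shrinks (the last del of index k happens after k + C_k - 1 earlier deletions, C_k the
-- cumulative drop count through index k, so it needs k + C_k ≤ len(coupleVec)).
def Pre_sortParentheses (coupleVec : List (List Int × Int)) : Prop :=
  (∀ c ∈ coupleVec, c.1 ≠ []) ∧
  ∀ k < coupleVec.length,
    (pvCounts coupleVec).getD k 0 = 0 ∨
      k + (((pvCounts coupleVec).take (k + 1)).sum) ≤ coupleVec.length
instance (coupleVec : List (List Int × Int)) : Decidable (Pre_sortParentheses coupleVec) := by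
  unfold Pre_sortParentheses; infer_instance

def pvWitness_sortParentheses : (List (List Int × Int)) := [([0], 3), ([1], 1)]

-- On inputs with at least two dominating pairs in total, A's collected drop indices go stale as
-- its earlier deletions shift the list, so A deletes neighbouring couples that are not
-- dominated; B removes exactly the dominated couples, which is the intended behaviour.
def D_sortParentheses (coupleVec : List (List Int × Int)) : Prop :=
  2 ≤ (pvCounts coupleVec).sum
instance (coupleVec : List (List Int × Int)) : Decidable (D_sortParentheses coupleVec) := by
  unfold D_sortParentheses; infer_instance

def Spec_sortParentheses (coupleVec : List (List Int × Int)) (out : List (List Int × Int)) :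
    Prop := ¬ D_sortParentheses coupleVec → out = sortParentheses_alt coupleVec
instance (coupleVec : List (List Int × Int)) (out : List (List Int × Int)) :
    Decidable (Spec_sortParentheses coupleVec out) := by unfold Spec_sortParentheses; infer_instance

def pvDiffWitness_sortParentheses : (List (List Int × Int)) := [([2], 3), ([0], 9), ([1], 9)]
def pvDiffWitnessOut_sortParentheses : (List (List Int × Int)) × (List (List Int × Int)) :=
  ([([1], 9)], [([0], 9), ([1], 9)])

-- ===== CLAIM (what is proved, stated in full; the proofs are below) =====
def Claim_unchanged_sortParentheses : Prop := ∀ (coupleVec : List (List Int × Int)),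
  Dom_sortParentheses coupleVec → Pre_sortParentheses coupleVec →
  Spec_sortParentheses coupleVec (sortParentheses coupleVec)
def Claim_changed_sortParentheses : Prop :=
  Dom_sortParentheses (pvDiffWitness_sortParentheses) ∧
  Pre_sortParentheses (pvDiffWitness_sortParentheses) ∧
  D_sortParentheses (pvDiffWitness_sortParentheses) ∧
  sortParentheses (pvDiffWitness_sortParentheses) = pvDiffWitnessOut_sortParentheses.1 ∧
  sortParentheses_alt (pvDiffWitness_sortParentheses) = pvDiffWitnessOut_sortParentheses.2 ∧
  pvDiffWitnessOut_sortParentheses.1 ≠ pvDiffWitnessOut_sortParentheses.2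

-- ===== LEMMAS AND PROOFS =====

-- couple c is dominated ("eclipsed") by couple c2 when c2 has a smaller first bound and a
-- larger second bound, phrased as the ports phrase it
def pvEclipses (c c2 : List Int × Int) : Bool :=
  PySem.List.pyGetD c.1 0 0 > PySem.List.pyGetD c2.1 0 0 && c.2 < c2.2
-- the dominator multiplicities again, phrased as the ports phrase them
def pvMs (cv : List (List Int × Int)) : List Nat := cv.map (fun c => cv.countP (pvEclipses c))

theorem headI_eq (l : List Int) : PySem.List.pyGetD l 0 0 = l.headI := by
  cases l <;> simp [PySem.List.pyGetD_zero]

theorem pvCounts_eq (cv : List (List Int × Int)) : pvCounts cv = pvMs cv := by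
  unfold pvCounts pvMs
  apply List.map_congr_left
  intro c _
  unfold pvCountDominators
  rw [← List.countP_eq_length_filter]
  have hfe : (fun c2 : List Int × Int => decide (c2.1.headI < c.1.headI ∧ c.2 < c2.2))
      = pvEclipses c :=
    funext (fun c2 => by simp [pvEclipses, headI_eq, gt_iff_lt])
  rw [hfe]

-- keep the elements of xs whose position satisfies P
def keepPos {α : Type} (xs : List α) (P : Nat → Bool) : List α :=
  match xs with
  | [] => []
  | x :: xs => (if P 0 then [x] else []) ++ keepPos xs (fun k => P (k + 1))

-- the drop sequence: index s repeated ms[0] times, s+1 repeated ms[1] times, …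
def dropsFrom (s : Nat) : List Nat → List Nat
  | [] => []
  | m :: ms => List.replicate m s ++ dropsFrom (s + 1) ms

theorem keepPos_congr {α : Type} (xs : List α) (P Q : Nat → Bool)
    (h : ∀ k, P k = Q k) : keepPos xs P = keepPos xs Q := by
  induction xs generalizing P Q with
  | nil => rfl
  | cons x xs ih => simp [keepPos, h 0, ih (fun k => P (k+1)) (fun k => Q (k+1)) (fun k => h (k+1))]

theorem keepPos_eq_filter {α : Type} : ∀ (xs : List α) (P : Nat → Bool) (p : α → Bool),
    (∀ k (h : k < xs.length), P k = p xs[k]) → keepPos xs P = xs.filter p := by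
  intro xs
  induction xs with
  | nil => intro P p _; rfl
  | cons x xs ih =>
    intro P p h
    have h0 := h 0 (by simp)
    simp only [List.getElem_cons_zero] at h0
    rw [keepPos, h0, ih (fun k => P (k+1)) p
      (fun k hk => by simpa using h (k+1) (by simpa using Nat.succ_lt_succ hk))]
    by_cases hx : p x
    · simp [hx]
    · simp only [Bool.not_eq_true] at hx
      simp [hx]

-- the enumerate/flatMap → dropsFrom bridge (cv is the ambient list the counts refer to)
theorem enumFlat (cv : List (List Int × Int)) : ∀ (cv' : List (List Int × Int)) (s : Nat),
    (PySem.List.enumerate cv' (s : Int)).flatMap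
      (fun ic => List.replicate (cv.countP (pvEclipses ic.2)) ic.1)
    = (dropsFrom s (cv'.map (fun c => cv.countP (pvEclipses c)))).map (fun d : Nat => (d : Int)) := by
  intro cv'
  induction cv' with
  | nil => intro s; simp [PySem.List.enumerate_nil, dropsFrom]
  | cons c cv' ih =>
    intro s
    rw [PySem.List.enumerate_cons]
    simp only [List.flatMap_cons, List.map_cons, dropsFrom, List.map_append, List.map_replicate]
    congr 1
    have : ((s : Int) + 1) = ((s + 1 : Nat) : Int) := by push_cast; ring
    rw [this, ih (s + 1)]

theorem A_norm (cv : List (List Int × Int)) :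
    sortParentheses cv
      = ((dropsFrom 0 (pvMs cv)).map (fun d : Nat => (d : Int))).foldl
          (fun cur i => match PySem.List.pop? cur i with
            | some r => r.2
            | none => cur) cv := by
  unfold sortParentheses
  dsimp only
  congr 1
  have hinner : ∀ (acc : List Int) (ic : Int × (List Int × Int)),
      cv.foldl (fun acc2 c2 =>
        if PySem.List.pyGetD ic.2.1 0 0 > PySem.List.pyGetD c2.1 0 0 && ic.2.2 < c2.2
        then acc2 ++ [ic.1] else acc2) acc
      = acc ++ List.replicate (cv.countP (pvEclipses ic.2)) ic.1 := by
    intro acc ic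
    rw [PySem.List.foldl_append_if]
    congr 1
    rw [List.map_const']
    congr 1
    rw [← List.countP_eq_length_filter]
    rfl
  have h1 := PySem.List.foldl_congr_mem
      (l := PySem.List.enumerate cv) (init := ([] : List Int))
      (f := fun acc ic => cv.foldl
        (fun acc2 c2 =>
          if PySem.List.pyGetD ic.2.1 0 0 > PySem.List.pyGetD c2.1 0 0 && ic.2.2 < c2.2
          then acc2 ++ [ic.1] else acc2) acc)
      (g := fun acc ic => acc ++ List.replicate (cv.countP (pvEclipses ic.2)) ic.1)
      (fun acc ic _ => hinner acc ic)
  rw [h1]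
  rw [PySem.List.foldl_append_eq_flatMap]
  rw [show (PySem.List.enumerate cv) = PySem.List.enumerate cv ((0 : Nat) : Int) by norm_num]
  rw [enumFlat cv cv 0]
  simp [pvMs]

-- the final comprehension: an enumerate fold filtering by a position predicate is keepPos
theorem filterEnum {γ : Type} : ∀ (xs : List γ) (s : Nat) (q : Int → Bool) (acc : List γ),
    (PySem.List.enumerate xs (s : Int)).foldl
      (fun acc pc => if q pc.1 then acc ++ [pc.2] else acc) acc
    = acc ++ keepPos xs (fun k => q ((s : Int) + (k : Int))) := by
  intro xs
  induction xs with
  | nil => intro s q acc; simp [PySem.List.enumerate_nil, keepPos]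
  | cons x xs ih =>
    intro s q acc
    rw [PySem.List.enumerate_cons, List.foldl_cons]
    have hcast : ((s : Int) + 1) = ((s + 1 : Nat) : Int) := by norm_num
    dsimp only
    rw [hcast, ih (s + 1)]
    have htail : keepPos xs (fun k => q (((s + 1 : Nat) : Int) + (k : Int)))
        = keepPos xs (fun k => q ((s : Int) + ((k + 1 : Nat) : Int))) :=
      keepPos_congr _ _ _ (fun k => by congr 1; push_cast; ring)
    rw [htail]
    by_cases hq : q ((s : Int)) = true
    · simp [keepPos, hq, List.append_assoc]
    · simp only [Bool.not_eq_true] at hq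
      simp [keepPos, hq]

-- ===== A-side: value of A when at most one dominating pair exists =====

theorem dropsFrom_zeros : ∀ (l : List Nat) (s : Nat), (∀ m ∈ l, m = 0) → dropsFrom s l = [] := by
  intro l
  induction l with
  | nil => intro s _; rfl
  | cons m l ih =>
    intro s h
    have hm : m = 0 := h m (by simp)
    simp [dropsFrom, hm, ih (s + 1) (fun x hx => h x (by simp [hx]))]

theorem dropsFrom_append (l1 : List Nat) : ∀ (l2 : List Nat) (s : Nat),
    dropsFrom s (l1 ++ l2) = dropsFrom s l1 ++ dropsFrom (s + l1.length) l2 := by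
  induction l1 with
  | nil => intro l2 s; simp [dropsFrom]
  | cons m l1 ih =>
    intro l2 s
    simp only [List.cons_append, dropsFrom, ih l2 (s + 1), List.length_cons, List.append_assoc]
    congr 3
    omega

theorem sum_eq_one : ∀ (l : List Nat), l.sum = 1 →
    ∃ l1 l2, l = l1 ++ 1 :: l2 ∧ (∀ m ∈ l1, m = 0) ∧ (∀ m ∈ l2, m = 0) := by
  intro l
  induction l with
  | nil => intro h; simp at h
  | cons x t ih =>
    intro h
    rw [List.sum_cons] at h
    rcases x with _ | x
    · obtain ⟨l1, l2, h1, h2, h3⟩ := ih (by omega)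
      refine ⟨0 :: l1, l2, by simp [h1], ?_, h3⟩
      intro m hm
      rcases List.mem_cons.1 hm with rfl | hm
      · rfl
      · exact h2 m hm
    · have hx : x = 0 := by omega
      subst hx
      have ht : t.sum = 0 := by omega
      exact ⟨[], t, by simp, by simp, List.sum_eq_zero_iff_forall_eq_nat.1 ht⟩

theorem erase_filter {α : Type} (p : α → Bool) (a : List α) (x : α) (t : List α)
    (ha : ∀ c ∈ a, p c = true) (hx : p x = false) (ht : ∀ c ∈ t, p c = true) :
    (a ++ x :: t).eraseIdx a.length = (a ++ x :: t).filter p := by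
  rw [List.eraseIdx_append_of_length_le (le_refl _), Nat.sub_self]
  rw [List.filter_append, List.filter_cons, hx]
  simp only [Bool.false_eq_true, if_false, List.eraseIdx_cons_zero]
  rw [List.filter_eq_self.2 ha, List.filter_eq_self.2 ht]

-- the value both programs compute when at most one dominating pair exists: keep exactly the
-- couples no other couple dominates
theorem A_unchanged (cv : List (List Int × Int)) (h : (pvMs cv).sum ≤ 1) :
    sortParentheses cv = cv.filter (fun c => !(cv.any (fun c2 => pvEclipses c c2))) := by
  have hkeep : ∀ c, cv.countP (pvEclipses c) = 0 →
      (!(cv.any (fun c2 => pvEclipses c c2))) = true := by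
    intro c hc
    simp only [Bool.not_eq_true', List.any_eq_false]
    intro c2 hc2
    exact (List.countP_eq_zero.1 hc) c2 hc2
  rw [A_norm]
  rcases Nat.le_one_iff_eq_zero_or_eq_one.1 h with h0 | h1
  · have hz : ∀ m ∈ pvMs cv, m = 0 := List.sum_eq_zero_iff_forall_eq_nat.1 h0
    rw [dropsFrom_zeros _ _ hz]
    simp only [List.map_nil, List.foldl_nil]
    symm
    apply List.filter_eq_self.2
    intro c hc
    exact hkeep c (hz _ (List.mem_map_of_mem hc))
  · obtain ⟨m1, m2, hms, h1z, h2z⟩ := sum_eq_one _ h1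
    have hms' : cv.map (fun c => cv.countP (pvEclipses c)) = m1 ++ 1 :: m2 := hms
    obtain ⟨a, rest, hcv, hma, hmrest⟩ := List.map_eq_append_iff.1 hms'
    obtain ⟨x, t, hrest, hfx, hmt⟩ := List.map_eq_cons_iff.1 hmrest
    subst hrest
    have hlena : a.length = m1.length := by rw [← hma, List.length_map]
    have hdrops : dropsFrom 0 (pvMs cv) = [a.length] := by
      unfold pvMs
      rw [hms', dropsFrom_append, dropsFrom_zeros _ _ h1z]
      simp only [dropsFrom, List.replicate_one, List.nil_append, Nat.zero_add]
      rw [dropsFrom_zeros _ _ h2z, hlena, List.append_nil]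
    rw [hdrops]
    simp only [List.map_cons, List.map_nil, List.foldl_cons, List.foldl_nil]
    have hk : a.length < cv.length := by
      rw [hcv, List.length_append, List.length_cons]
      omega
    rw [PySem.List.pop?_natCast cv a.length hk]
    show cv.eraseIdx a.length = _
    have hka : ∀ c ∈ a, (!(cv.any (fun c2 => pvEclipses c c2))) = true := by
      intro c hc
      apply hkeep
      have : cv.countP (pvEclipses c) ∈ m1 := by
        rw [← hma]; exact List.mem_map_of_mem hc
      exact h1z _ this
    have hkt : ∀ c ∈ t, (!(cv.any (fun c2 => pvEclipses c c2))) = true := by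
      intro c hc
      apply hkeep
      have : cv.countP (pvEclipses c) ∈ m2 := by
        rw [← hmt]; exact List.mem_map_of_mem hc
      exact h2z _ this
    have hkx : (!(cv.any (fun c2 => pvEclipses x c2))) = false := by
      have hpos : 0 < cv.countP (pvEclipses x) := by rw [hfx]; omega
      obtain ⟨c2, hc2, hpc2⟩ := List.countP_pos_iff.1 hpos
      simp only [Bool.not_eq_false', List.any_eq_true]
      exact ⟨c2, hc2, hpc2⟩
    rw [hcv] at hka hkt hkx ⊢
    exact erase_filter _ a x t hka hkx hkt

-- ===== B-side: the sweep marks exactly the dominated couples =====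

-- running maximum of the second bounds over a list of indices (Source B's run_max)
def maxE (cv : List (List Int × Int)) (P : List Int) : Option Int :=
  P.foldl (fun r j => match r with
    | none => some (pvEndAt cv j)
    | some r => if pvEndAt cv j > r then some (pvEndAt cv j) else some r) none

theorem maxE_append (cv : List (List Int × Int)) (P : List Int) (i : Int) :
    maxE cv (P ++ [i]) = (match maxE cv P with
      | none => some (pvEndAt cv i)
      | some r => if pvEndAt cv i > r then some (pvEndAt cv i) else some r) := by
  unfold maxE
  rw [List.foldl_append]
  rfl

theorem maxE_spec (cv : List (List Int × Int)) : ∀ P : List Int,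
    (maxE cv P = none ∧ P = []) ∨
    (∃ b, maxE cv P = some b ∧ (∃ j ∈ P, pvEndAt cv j = b) ∧ ∀ j ∈ P, pvEndAt cv j ≤ b) := by
  intro P
  induction P using List.reverseRecOn with
  | nil => exact Or.inl ⟨rfl, rfl⟩
  | append_singleton P i ih =>
    right
    rw [maxE_append]
    rcases ih with ⟨hnone, rfl⟩ | ⟨b, hb, ⟨j0, hj0, hj0e⟩, hmax⟩
    · rw [hnone]
      exact ⟨pvEndAt cv i, rfl, ⟨i, by simp⟩, by simp⟩
    · rw [hb]
      by_cases hlt : pvEndAt cv i > b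
      · refine ⟨pvEndAt cv i, by simp [hlt], ⟨i, by simp⟩, ?_⟩
        intro j hj
        rcases List.mem_append.1 hj with hj | hj
        · have := hmax j hj; omega
        · simp only [List.mem_singleton] at hj; subst hj; exact le_refl _
      · refine ⟨b, by simp [hlt], ⟨j0, by simp [hj0], hj0e⟩, ?_⟩
        intro j hj
        rcases List.mem_append.1 hj with hj | hj
        · exact hmax j hj
        · simp only [List.mem_singleton] at hj; subst hj; omega

theorem maxE_cond (cv : List (List Int × Int)) (P : List Int) (K E : Int) :
    (match maxE cv (P.filter (fun j => decide (pvKeyAt cv j < K))) with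
      | some b => decide (E < b)
      | none => false)
    = decide (∃ j ∈ P, pvKeyAt cv j < K ∧ E < pvEndAt cv j) := by
  have hmem : ∀ j : Int, j ∈ P.filter (fun j => decide (pvKeyAt cv j < K))
      ↔ j ∈ P ∧ pvKeyAt cv j < K := by
    intro j; simp [List.mem_filter]
  rcases maxE_spec cv (P.filter (fun j => decide (pvKeyAt cv j < K))) with
    ⟨hnone, hnil⟩ | ⟨b, hb, ⟨j0, hj0, hj0e⟩, hmax⟩
  · rw [hnone]
    symm
    simp only [decide_eq_false_iff_not]
    rintro ⟨j, hj, hk, he⟩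
    have : j ∈ P.filter (fun j => decide (pvKeyAt cv j < K)) := (hmem j).2 ⟨hj, hk⟩
    rw [hnil] at this
    simp at this
  · rw [hb]
    obtain ⟨hj0P, hj0K⟩ := (hmem j0).1 hj0
    by_cases hE : E < b
    · simp only [hE, decide_true]
      symm
      simp only [decide_eq_true_eq]
      exact ⟨j0, hj0P, hj0K, by omega⟩
    · have hE' : ¬ (E < b) := hE
      simp only [hE', decide_false]
      symm
      simp only [decide_eq_false_iff_not]
      rintro ⟨j, hj, hk, he⟩
      have := hmax j ((hmem j).2 ⟨hj, hk⟩)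
      omega

-- the sweep invariant: after processing the index prefix P of the sorted order,
-- dominated marks exactly the processed couples dominated by a processed couple, run_max is
-- the max second bound of the processed couples, and best lags one key group behind
def bInvP (cv : List (List Int × Int)) (P : List Int)
    (st : List Bool × Option Int × Option Int × Option Int) : Prop :=
  st.1.length = cv.length
  ∧ (∀ m : Nat, m < cv.length →
      st.1.getD m false = decide ((m : Int) ∈ P ∧ ∃ j ∈ P,
        pvKeyAt cv j < pvKeyAt cv (m : Int) ∧ pvEndAt cv (m : Int) < pvEndAt cv j))
  ∧ st.2.2.1 = maxE cv P
  ∧ ((P = [] ∧ st.2.1 = none ∧ st.2.2.2 = none) ∨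
     (∃ Q l, P = Q ++ [l] ∧ st.2.2.2 = some (pvKeyAt cv l)
       ∧ st.2.1 = maxE cv (P.filter (fun j => decide (pvKeyAt cv j < pvKeyAt cv l)))))

theorem bStep_inv (cv : List (List Int × Int)) (P : List Int) (i : Int)
    (st : List Bool × Option Int × Option Int × Option Int)
    (mi : Nat) (hmi : mi < cv.length) (him : i = (mi : Int))
    (hIH : bInvP cv P st) (hiP : i ∉ P)
    (hle : ∀ j ∈ P, pvKeyAt cv j ≤ pvKeyAt cv i)
    (hpwP : P.Pairwise (fun a b => pvKeyAt cv a ≤ pvKeyAt cv b)) :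
    bInvP cv (P ++ [i]) (bStep cv st i) := by
  obtain ⟨dom, best, run, prev⟩ := st
  obtain ⟨hlen, hdom, hrun, hshape⟩ := hIH
  dsimp only at hlen hdom hrun hshape
  have hbest' : bBest cv (dom, best, run, prev) i
      = maxE cv (P.filter (fun j => decide (pvKeyAt cv j < pvKeyAt cv i))) := by
    rcases hshape with ⟨hP, hbest, hprev⟩ | ⟨Q, l, hPQ, hprev, hbest⟩
    · subst hP
      simp [bBest, hprev, hbest, maxE]
    · by_cases hk : pvKeyAt cv i = pvKeyAt cv l
      · have hfe : P.filter (fun j => decide (pvKeyAt cv j < pvKeyAt cv i))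
            = P.filter (fun j => decide (pvKeyAt cv j < pvKeyAt cv l)) := by rw [hk]
        rw [hfe, ← hbest]
        simp [bBest, hprev, hk]
      · have hlP : l ∈ P := by rw [hPQ]; simp
        have hlt : pvKeyAt cv l < pvKeyAt cv i :=
          lt_of_le_of_ne (hle l hlP) (fun hh => hk hh.symm)
        have hall : ∀ j ∈ P, pvKeyAt cv j ≤ pvKeyAt cv l := by
          intro j hj
          rw [hPQ] at hj hpwP
          rcases List.mem_append.1 hj with hj | hj
          · exact (List.pairwise_append.1 hpwP).2.2 j hj l (by simp)
          · simp only [List.mem_singleton] at hj; subst hj; exact le_refl _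
        have hfe : P.filter (fun j => decide (pvKeyAt cv j < pvKeyAt cv i)) = P := by
          apply List.filter_eq_self.2
          intro j hj
          simp only [decide_eq_true_eq]
          exact lt_of_le_of_lt (hall j hj) hlt
        rw [hfe, ← hrun]
        simp [bBest, hprev, hk]
  have hsame : ∀ m : Nat, ((m : Int)) ≠ i →
      decide ((m : Int) ∈ P ∧ ∃ j ∈ P,
        pvKeyAt cv j < pvKeyAt cv (m : Int) ∧ pvEndAt cv (m : Int) < pvEndAt cv j)
      = decide ((m : Int) ∈ P ++ [i] ∧ ∃ j ∈ P ++ [i],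
        pvKeyAt cv j < pvKeyAt cv (m : Int) ∧ pvEndAt cv (m : Int) < pvEndAt cv j) := by
    intro m hmne
    rw [decide_eq_decide]
    constructor
    · rintro ⟨hmP, j, hj, hjk, hje⟩
      exact ⟨List.mem_append_left _ hmP, j, List.mem_append_left _ hj, hjk, hje⟩
    · rintro ⟨hmP, j, hj, hjk, hje⟩
      have hmP' : (m : Int) ∈ P := by
        rcases List.mem_append.1 hmP with hh | hh
        · exact hh
        · simp only [List.mem_singleton] at hh; exact absurd hh hmne
      refine ⟨hmP', ?_⟩
      rcases List.mem_append.1 hj with hh | hh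
      · exact ⟨j, hh, hjk, hje⟩
      · simp only [List.mem_singleton] at hh
        subst hh
        have := hle _ hmP'
        omega
  refine ⟨?_, ?_, ?_, ?_⟩
  · -- length of dominated
    show (match bBest cv (dom, best, run, prev) i with
      | some b => if pvEndAt cv i < b then PySem.List.pySetD dom i true else dom
      | none => dom).length = cv.length
    rw [hbest']
    cases hM : maxE cv (P.filter (fun j => decide (pvKeyAt cv j < pvKeyAt cv i))) with
    | none => exact hlen
    | some b =>
      by_cases hE : pvEndAt cv i < b
      · simp only [hE, if_true]
        rw [PySem.List.length_pySetD]
        exact hlen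
      · simp only [hE, if_false]
        exact hlen
  · -- the dominated marks
    intro m hm
    show (match bBest cv (dom, best, run, prev) i with
      | some b => if pvEndAt cv i < b then PySem.List.pySetD dom i true else dom
      | none => dom).getD m false = _
    rw [hbest']
    have hcond : (match maxE cv (P.filter (fun j => decide (pvKeyAt cv j < pvKeyAt cv i))) with
        | some b => decide (pvEndAt cv i < b) | none => false)
        = decide (∃ j ∈ P, pvKeyAt cv j < pvKeyAt cv i ∧ pvEndAt cv i < pvEndAt cv j) :=
      maxE_cond cv P _ _
    have hlhs : (match maxE cv (P.filter (fun j => decide (pvKeyAt cv j < pvKeyAt cv i))) with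
        | some b => if pvEndAt cv i < b then PySem.List.pySetD dom i true else dom
        | none => dom)
        = (if (match maxE cv (P.filter (fun j => decide (pvKeyAt cv j < pvKeyAt cv i))) with
              | some b => decide (pvEndAt cv i < b) | none => false) = true
           then PySem.List.pySetD dom i true else dom) := by
      cases maxE cv (P.filter (fun j => decide (pvKeyAt cv j < pvKeyAt cv i))) with
      | none => simp
      | some b =>
        by_cases hE : pvEndAt cv i < b
        · simp [hE]
        · simp [hE]
    rw [hlhs, hcond]
    by_cases hmi' : (m : Int) = i
    · have hmieq : m = mi := by rw [him] at hmi'; exact_mod_cast hmi'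
      subst hmieq
      have hmP : ((m : Int)) ∉ P := by rw [hmi']; exact hiP
      have hgoal : decide ((m : Int) ∈ P ++ [i] ∧ ∃ j ∈ P ++ [i],
          pvKeyAt cv j < pvKeyAt cv (m : Int) ∧ pvEndAt cv (m : Int) < pvEndAt cv j)
          = decide (∃ j ∈ P, pvKeyAt cv j < pvKeyAt cv i ∧ pvEndAt cv i < pvEndAt cv j) := by
        rw [decide_eq_decide]
        constructor
        · rintro ⟨-, j, hj, hjk, hje⟩
          rcases List.mem_append.1 hj with hh | hh
          · rw [hmi'] at hjk hje
            exact ⟨j, hh, hjk, hje⟩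
          · simp only [List.mem_singleton] at hh
            subst hh
            rw [hmi'] at hjk
            omega
        · rintro ⟨j, hj, hjk, hje⟩
          rw [← hmi'] at hjk hje
          exact ⟨List.mem_append_right _ (by simp [hmi']), j, List.mem_append_left _ hj, hjk, hje⟩
      rw [hgoal]
      have hset : PySem.List.pySetD dom i true = dom.set m true := by
        rw [him, PySem.List.pySetD_natCast]
      by_cases hC : decide (∃ j ∈ P, pvKeyAt cv j < pvKeyAt cv i
          ∧ pvEndAt cv i < pvEndAt cv j) = true
      · rw [if_pos hC, hset]
        have hmlen : m < dom.length := by rw [hlen]; exact hm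
        rw [List.getD_eq_getElem?_getD, List.getElem?_set_self hmlen]
        simp only [Option.getD_some]
        exact hC.symm
      · rw [if_neg hC]
        have hfalse : dom.getD m false = false := by
          rw [hdom m hm]
          simp [hmP]
        rw [hfalse]
        simp only [Bool.not_eq_true] at hC
        exact hC.symm
    · have hmne : m ≠ mi := by
        intro hh
        apply hmi'
        rw [hh, him]
      have hset : PySem.List.pySetD dom i true = dom.set mi true := by
        rw [him, PySem.List.pySetD_natCast]
      have hunch : (if (decide (∃ j ∈ P, pvKeyAt cv j < pvKeyAt cv i
            ∧ pvEndAt cv i < pvEndAt cv j)) = true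
          then PySem.List.pySetD dom i true else dom).getD m false
          = dom.getD m false := by
        split
        · rw [hset, List.getD_eq_getElem?_getD,
            List.getElem?_set_ne (Ne.symm hmne), ← List.getD_eq_getElem?_getD]
        · rfl
      rw [hunch, hdom m hm, hsame m hmi']
  · -- run_max
    rw [maxE_append, ← hrun]
    rfl
  · -- shape: best lags one key group behind the new last element i
    right
    refine ⟨P, i, rfl, rfl, ?_⟩
    show bBest cv (dom, best, run, prev) i = _
    rw [hbest']
    congr 1
    rw [List.filter_append]
    simp

theorem bInv (cv : List (List Int × Int)) : ∀ (P : List Int),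
    P.Nodup → P.Pairwise (fun a b => pvKeyAt cv a ≤ pvKeyAt cv b) →
    (∀ j ∈ P, ∃ m : Nat, m < cv.length ∧ j = (m : Int)) →
    bInvP cv P (P.foldl (bStep cv) (List.replicate cv.length false, none, none, none)) := by
  intro P
  induction P using List.reverseRecOn with
  | nil =>
    intro _ _ _
    refine ⟨by simp, ?_, rfl, Or.inl ⟨rfl, rfl, rfl⟩⟩
    intro m hm
    simp [List.getD]
  | append_singleton P i ih =>
    intro hnd hpw hb
    rw [List.foldl_append]
    simp only [List.foldl_cons, List.foldl_nil]
    obtain ⟨hndP, -, hdisj⟩ := List.nodup_append.1 hnd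
    obtain ⟨hpwP, -, hrel⟩ := List.pairwise_append.1 hpw
    obtain ⟨mi, hmi, him⟩ := hb i (by simp)
    exact bStep_inv cv P i _ mi hmi him
      (ih hndP hpwP (fun j hj => hb j (List.mem_append_left _ hj)))
      (fun hiP => hdisj i hiP i (by simp) rfl)
      (fun j hj => hrel j hj i (by simp))
      hpwP

theorem B_norm (cv : List (List Int × Int)) :
    sortParentheses_alt cv
      = cv.filter (fun c => !(cv.any (fun c2 => pvEclipses c c2))) := by
  unfold sortParentheses_alt
  dsimp only
  have hperm : (PySem.List.sorted (PySem.List.pyRange 0 ((cv.length : Nat) : Int) 1)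
      (fun i => pvKeyAt cv i)).Perm (PySem.List.pyRange 0 ((cv.length : Nat) : Int) 1) :=
    PySem.List.sorted_perm _ _ _
  have hnd : (PySem.List.sorted (PySem.List.pyRange 0 ((cv.length : Nat) : Int) 1)
      (fun i => pvKeyAt cv i)).Nodup :=
    hperm.nodup_iff.2 (PySem.List.nodup_pyRange_one _ _)
  have hpw := PySem.List.sorted_pairwise (PySem.List.pyRange 0 ((cv.length : Nat) : Int) 1)
      (fun i => pvKeyAt cv i)
  have hbnd : ∀ j ∈ PySem.List.sorted (PySem.List.pyRange 0 ((cv.length : Nat) : Int) 1)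
      (fun i => pvKeyAt cv i), ∃ m : Nat, m < cv.length ∧ j = (m : Int) := by
    intro j hj
    have := (PySem.List.mem_pyRange_one).1 (hperm.mem_iff.1 hj)
    exact ⟨j.toNat, by omega, by omega⟩
  obtain ⟨hlen, hdom, -, -⟩ := bInv cv _ hnd hpw hbnd
  have hmemo : ∀ m : Nat, m < cv.length →
      ((m : Int)) ∈ PySem.List.sorted (PySem.List.pyRange 0 ((cv.length : Nat) : Int) 1)
        (fun i => pvKeyAt cv i) := by
    intro m hm
    exact hperm.mem_iff.2 (PySem.List.mem_pyRange_one.2 ⟨by omega, by omega⟩)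
  -- the marks are exactly "dominated by some couple of cv"
  have hdomv : ∀ m : Nat, m < cv.length →
      ((PySem.List.sorted (PySem.List.pyRange 0 ((cv.length : Nat) : Int) 1)
          (fun i => pvKeyAt cv i)).foldl (bStep cv)
          (List.replicate cv.length false, none, none, none)).1.getD m false
        = cv.any (fun c2 => pvEclipses (cv.getD m ([], 0)) c2) := by
    intro m hm
    rw [hdom m hm]
    have hiff : (((m : Int)) ∈ PySem.List.sorted (PySem.List.pyRange 0 ((cv.length : Nat) : Int) 1)
          (fun i => pvKeyAt cv i) ∧
        ∃ j ∈ PySem.List.sorted (PySem.List.pyRange 0 ((cv.length : Nat) : Int) 1)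
          (fun i => pvKeyAt cv i),
          pvKeyAt cv j < pvKeyAt cv (m : Int) ∧ pvEndAt cv (m : Int) < pvEndAt cv j)
        ↔ (cv.any (fun c2 => pvEclipses (cv.getD m ([], 0)) c2) = true) := by
      rw [List.any_eq_true]
      constructor
      · rintro ⟨-, j, hj, hjk, hje⟩
        obtain ⟨mj, hmj, rfl⟩ := hbnd j hj
        refine ⟨cv.getD mj ([], 0), ?_, ?_⟩
        · rw [List.getD_eq_getElem cv ([], 0) hmj]
          exact List.getElem_mem hmj
        · simp only [pvEclipses, pvKeyAt, pvEndAt, PySem.List.pyGetD_natCast] at hjk hje ⊢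
          simp only [gt_iff_lt, Bool.and_eq_true, decide_eq_true_eq]
          exact ⟨hjk, hje⟩
      · rintro ⟨c2, hc2, hp⟩
        obtain ⟨mj, hmj, hc2e⟩ := List.mem_iff_getElem.1 hc2
        refine ⟨hmemo m hm, (mj : Int), hmemo mj hmj, ?_⟩
        simp only [pvEclipses, gt_iff_lt, Bool.and_eq_true, decide_eq_true_eq] at hp
        simp only [pvKeyAt, pvEndAt, PySem.List.pyGetD_natCast]
        rw [List.getD_eq_getElem cv ([], 0) hmj, hc2e]
        exact hp
    rw [decide_eq_decide.mpr hiff, Bool.decide_coe]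
  rw [show PySem.List.enumerate cv = PySem.List.enumerate cv ((0 : Nat) : Int) from by norm_num]
  refine (filterEnum cv 0 (fun t : Int => !(PySem.List.pyGetD (List.foldl (bStep cv)
      (List.replicate cv.length false, none, none, none)
      (PySem.List.sorted (PySem.List.pyRange 0 ((cv.length : Nat) : Int) 1)
        (fun i => pvKeyAt cv i))).1 t false)) []).trans ?_
  rw [List.nil_append]
  apply keepPos_eq_filter
  intro k hk
  dsimp only
  rw [show ((0 : Nat) : Int) + (k : Int) = ((k : Nat) : Int) from by push_cast; ring,
    PySem.List.pyGetD_natCast, hdomv k hk, List.getD_eq_getElem cv ([], 0) hk]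

-- ===== VERDICT (by name: the statements are the Claim_ definitions above) =====
theorem sortParentheses_spec : Claim_unchanged_sortParentheses := by
  unfold Claim_unchanged_sortParentheses
  intro cv _ _
  unfold Spec_sortParentheses
  intro hnd
  unfold D_sortParentheses at hnd
  rw [pvCounts_eq] at hnd
  rw [A_unchanged cv (by omega), B_norm cv]

theorem sortParentheses_changed : Claim_changed_sortParentheses := by
  unfold Claim_changed_sortParentheses
  decide
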